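-- pv_equiv track=rewrite | github.com/vaneuk/ansible-netbox-demo | plugins/filters/jinja_filters.py | vlan
-- ===== SOURCE A (Python) =====
-- def vlan(value: list) -> str:
--     if len(value) == 0:
--         return "none"
--
--     vlans = sorted(value)
--     vlan_ranges = [[vlans[0]]]
--     previous = vlans[0]
--     for v in vlans[1:]:
--         if v == previous + 1:
--             if len(vlan_ranges[-1]) == 1:
--                 vlan_ranges[-1].append(v)
--             else:
--                 vlan_ranges[-1][1] = v
--         else:
--             vlan_ranges.append([v])
--         previous = v
--     formatted_result = ",".join(["-".join([str(v) for v in vlan_range]) for vlan_range in vlan_ranges])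
--     return formatted_result
-- ===== SOURCE B (Python) =====
-- def vlan(value: list) -> str:
--     if len(value) == 0:
--         return "none"
--     vs = sorted(value)
--     brk = [(x, y) for x, y in zip(vs, vs[1:]) if y != x + 1]
--     starts = [vs[0]] + [y for _, y in brk]
--     ends = [x for x, _ in brk] + [vs[-1]]
--     return ",".join(str(a) if a == b else f"{a}-{b}" for a, b in zip(starts, ends))
-- ===== Notes on version B (the rewrite author's own statement) =====
-- stated objective: alternative
-- what changed: Replaces A's stateful loop that mutates a growing list-of-ranges with a declarative computation: find the break positions by zipping the sorted list with its own tail, read each run's endpoints off as zipped start/end lists, and format them directly.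
import Mathlib
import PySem

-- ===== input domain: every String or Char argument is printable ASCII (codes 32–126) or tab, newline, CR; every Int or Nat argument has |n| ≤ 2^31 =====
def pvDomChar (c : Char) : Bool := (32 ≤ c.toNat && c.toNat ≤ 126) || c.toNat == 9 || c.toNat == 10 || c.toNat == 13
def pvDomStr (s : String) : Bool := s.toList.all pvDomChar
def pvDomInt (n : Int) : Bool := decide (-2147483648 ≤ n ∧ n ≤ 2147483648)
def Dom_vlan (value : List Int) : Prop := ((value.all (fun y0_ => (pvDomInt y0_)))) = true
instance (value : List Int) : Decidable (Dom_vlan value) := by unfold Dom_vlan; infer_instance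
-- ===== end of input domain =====

-- B replaces A's stateful loop that mutates a growing list of ranges by computing the break
-- pairs of the sorted list (zip with its own tail) and zipping the run start/end lists; alternative decomposition, same cost.

-- ===== PORT A =====
-- 'vlan_ranges[-1].append(v)' / 'vlan_ranges[-1][1] = v': update the last range in place
def pvUpdOne (r : List Int) (v : Int) : List Int :=
  if r.length = 1 then r ++ [v] else r.set 1 v

def pvUpdLast (ranges : List (List Int)) (v : Int) : List (List Int) :=
  match ranges with
  | [] => []
  | [r] => [pvUpdOne r v]
  | r :: rs => r :: pvUpdLast rs v

def pvStepA (st : List (List Int) × Int) (v : Int) : List (List Int) × Int :=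
  if v = st.2 + 1 then (pvUpdLast st.1 v, v) else (st.1 ++ [[v]], v)

def vlan (value : List Int) : String :=
  if value.length = 0 then "none"
  else
    match PySem.List.sorted value (fun x => x) false with
    | [] => ""  -- unreachable: sorted of a nonempty list is nonempty
    | h :: t =>
      -- vlan_ranges = [[vlans[0]]]; previous = vlans[0]; for v in vlans[1:]: …
      let st := t.foldl pvStepA ([[h]], h)
      PySem.Str.join "," (st.1.map (fun r => PySem.Str.join "-" (r.map PySem.Int.toStr)))

-- ===== PORT B =====
-- str(a) if a == b else f"{a}-{b}"
def pvFmtB (p : Int × Int) : String :=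
  if p.1 = p.2 then PySem.Int.toStr p.1 else PySem.Int.toStr p.1 ++ "-" ++ PySem.Int.toStr p.2

def vlan_alt (value : List Int) : String :=
  if value.length = 0 then "none"
  else
    match PySem.List.sorted value (fun x => x) false with
    | [] => ""  -- unreachable: sorted of a nonempty list is nonempty
    | h :: t =>
      let vs := h :: t
      let brk := (List.zip vs (vs.drop 1)).filter (fun p => p.2 ≠ p.1 + 1)
      let starts := h :: brk.map Prod.snd
      let ends := brk.map Prod.fst ++ [vs.getLast (by simp)]
      PySem.Str.join "," ((List.zip starts ends).map pvFmtB)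

-- ===== PRECONDITION & SPEC =====
def Spec_vlan (value : List Int) (out : String) : Prop := out = vlan_alt value
instance (value : List Int) (out : String) : Decidable (Spec_vlan value out) := by unfold Spec_vlan; infer_instance

-- ===== CLAIM (what is proved, stated in full; the proofs are below) =====
def Claim_equal_vlan : Prop := ∀ (value : List Int), Dom_vlan value → Spec_vlan value (vlan value)

-- ===== LEMMAS AND PROOFS =====

-- the common skeleton: the (start, end) pairs of the maximal consecutive runs
def pvRuns (a b : Int) (xs : List Int) : List (Int × Int) :=
  match xs with
  | [] => [(a, b)]
  | v :: rest => if v = b + 1 then pvRuns a v rest else (a, b) :: pvRuns v v rest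

-- A's representation of the run (a, b)
def pvRepr (a b : Int) : List Int := if a = b then [a] else [a, b]

theorem pvUpdLast_append (done : List (List Int)) (r : List Int) (v : Int) :
    pvUpdLast (done ++ [r]) v = done ++ [pvUpdOne r v] := by
  induction done with
  | nil => rfl
  | cons d ds ih =>
      cases ds with
      | nil => rfl
      | cons e es => simpa [pvUpdLast] using ih

theorem pvUpdOne_repr (a b v : Int) (hab : a ≤ b) (hv : v = b + 1) :
    pvUpdOne (pvRepr a b) v = pvRepr a v := by
  have hav : a ≠ v := by omega
  have hbv : b ≠ v := by omega
  by_cases h : a = b <;> simp [pvRepr, pvUpdOne, h, hav, hbv]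

theorem foldA_runs (xs : List Int) : ∀ (done : List (List Int)) (a b : Int), a ≤ b →
    (xs.foldl pvStepA (done ++ [pvRepr a b], b)).1
      = done ++ (pvRuns a b xs).map (fun p => pvRepr p.1 p.2) := by
  induction xs with
  | nil => intro done a b _; simp [pvRuns]
  | cons v rest ih =>
      intro done a b hab
      by_cases hv : v = b + 1
      · have h1 : pvStepA (done ++ [pvRepr a b], b) v = (done ++ [pvRepr a v], v) := by
          simp only [pvStepA, if_pos hv, pvUpdLast_append, pvUpdOne_repr a b v hab hv]
        simp only [List.foldl_cons, h1, pvRuns, if_pos hv]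
        exact ih done a v (by omega)
      · have h1 : pvStepA (done ++ [pvRepr a b], b) v
            = ((done ++ [pvRepr a b]) ++ [pvRepr v v], v) := by
          simp [pvStepA, hv, pvRepr]
        rw [List.foldl_cons, h1, ih (done ++ [pvRepr a b]) v v le_rfl]
        simp [pvRuns, hv]

theorem zipB_runs (xs : List Int) : ∀ (a b : Int),
    (let brk := (List.zip (b :: xs) xs).filter (fun p => p.2 ≠ p.1 + 1)
     List.zip (a :: brk.map Prod.snd) (brk.map Prod.fst ++ [(b :: xs).getLast (by simp)]))
      = pvRuns a b xs := by
  induction xs with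
  | nil => intro a b; simp [pvRuns]
  | cons v rest ih =>
      intro a b
      by_cases hv : v = b + 1
      · simpa [pvRuns, hv, List.getLast] using ih a v
      · simpa [pvRuns, hv, List.getLast] using ih v v

theorem join_repr_fmt (a b : Int) :
    PySem.Str.join "-" ((pvRepr a b).map PySem.Int.toStr) = pvFmtB (a, b) := by
  by_cases h : a = b
  · simp [pvRepr, pvFmtB, h, PySem.Str.join, PySem.Int.toStr]
  · simp only [pvRepr, pvFmtB, h, ite_false]
    simp [PySem.Str.join, PySem.Chars.join_cons_cons, PySem.Chars.join_singleton]
    ext1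
    simp

-- ===== VERDICT (by name: the statement is the Claim_ definition above) =====
theorem vlan_spec : Claim_equal_vlan := by
  intro value _
  unfold Spec_vlan vlan vlan_alt
  by_cases hz : value.length = 0
  · simp [hz]
  · simp only [if_neg hz]
    cases hs : PySem.List.sorted value (fun x => x) false with
    | nil => rfl
    | cons h t =>
        simp only []
        have hA := foldA_runs t [] h h le_rfl
        simp only [List.nil_append] at hA
        have hB := zipB_runs t h h
        simp only [] at hB
        rw [show [[h]] = [pvRepr h h] from by simp [pvRepr], hA]
        simp only [List.drop_succ_cons, List.drop_zero]
        rw [hB]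
        rw [List.map_map]
        congr 1
        apply List.map_congr_left
        intro p hp
        simpa using join_repr_fmt p.1 p.2
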